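-- pv_equiv track=rewrite | github.com/20021423/tcpc | rc2_solver_minimizing.py | calculate_satisfied_weights
-- ===== SOURCE A (Python) =====
-- def calculate_satisfied_weights(solution, xij_vars, xijk_vars, wij, wijk):
--     satisfied_wij = 0
--     satisfied_wijk = 0
--
--     for var in solution:
--         if var > 0:
--             for (i, j), v in xij_vars.items():
--                 if v == var:
--                     satisfied_wij += wij.get((i, j), 0)
--             for (i, j, k), v in xijk_vars.items():
--                 if v == var:
--                     satisfied_wijk += wijk.get((i, j, k), 0)
--
--     return satisfied_wij + satisfied_wijk
-- ===== SOURCE B (Python) =====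
-- def calculate_satisfied_weights(solution, xij_vars, xijk_vars, wij, wijk):
--     # Aggregate weights by variable value once, then one pass over the solution list.
--     w2 = {}
--     for (i, j), v in xij_vars.items():
--         w2[v] = w2.get(v, 0) + wij.get((i, j), 0)
--     w3 = {}
--     for (i, j, k), v in xijk_vars.items():
--         w3[v] = w3.get(v, 0) + wijk.get((i, j, k), 0)
--     total = 0
--     for var in solution:
--         if var > 0:
--             total += w2.get(var, 0) + w3.get(var, 0)
--     return total
-- ===== Notes on version B (the rewrite author's own statement) =====
-- stated objective: faster
-- what changed: B pre-aggregates wij/wijk weights into two tables keyed by variable value in one pass each, then does a single lookup pass over the solution list, instead of rescanning both var dicts for every positive solution entry.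
import Mathlib
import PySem

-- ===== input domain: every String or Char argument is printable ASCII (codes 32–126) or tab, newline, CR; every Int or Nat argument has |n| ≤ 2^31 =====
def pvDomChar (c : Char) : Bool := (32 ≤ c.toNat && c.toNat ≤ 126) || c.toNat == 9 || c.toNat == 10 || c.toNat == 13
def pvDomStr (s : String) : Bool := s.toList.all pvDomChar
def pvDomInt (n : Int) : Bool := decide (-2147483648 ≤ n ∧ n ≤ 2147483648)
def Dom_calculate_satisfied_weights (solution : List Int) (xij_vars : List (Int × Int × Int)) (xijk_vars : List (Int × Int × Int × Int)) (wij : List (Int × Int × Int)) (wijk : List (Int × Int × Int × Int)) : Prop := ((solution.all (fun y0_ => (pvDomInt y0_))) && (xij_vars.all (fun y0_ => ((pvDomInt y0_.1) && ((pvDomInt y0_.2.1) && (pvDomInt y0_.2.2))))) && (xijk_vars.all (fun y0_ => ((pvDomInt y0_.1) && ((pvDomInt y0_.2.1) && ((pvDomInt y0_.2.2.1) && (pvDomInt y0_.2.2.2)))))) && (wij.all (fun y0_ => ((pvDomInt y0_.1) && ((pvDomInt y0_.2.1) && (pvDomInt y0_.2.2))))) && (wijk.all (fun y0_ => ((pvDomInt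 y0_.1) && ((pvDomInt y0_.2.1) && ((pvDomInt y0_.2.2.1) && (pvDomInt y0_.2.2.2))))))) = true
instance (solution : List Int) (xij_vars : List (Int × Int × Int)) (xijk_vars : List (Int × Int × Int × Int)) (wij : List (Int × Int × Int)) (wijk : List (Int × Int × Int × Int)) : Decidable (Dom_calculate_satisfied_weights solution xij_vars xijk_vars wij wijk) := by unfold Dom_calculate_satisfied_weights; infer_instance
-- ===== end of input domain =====

-- B pre-aggregates the wij/wijk weights into two tables keyed by variable value and then makes a
-- single lookup pass over the solution list, instead of rescanning both var dicts per solution entry.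

-- ===== PORT A =====
-- wij.get((i,j), 0): first-match lookup in the association list (exact for a Python dict)
def pvGetWij (wij : List (Int × Int × Int)) (i j : Int) : Int :=
  match wij with
  | [] => 0
  | (a, b, c) :: rest => if a = i ∧ b = j then c else pvGetWij rest i j

-- wijk.get((i,j,k), 0)
def pvGetWijk (wijk : List (Int × Int × Int × Int)) (i j k : Int) : Int :=
  match wijk with
  | [] => 0
  | (a, b, c, d) :: rest => if a = i ∧ b = j ∧ c = k then d else pvGetWijk rest i j k

def calculate_satisfied_weights (solution : List Int) (xij_vars : List (Int × Int × Int)) (xijk_vars : List (Int × Int × Int × Int)) (wij : List (Int × Int × Int)) (wijk : List (Int × Int × Int × Int)) : Int :=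
  let st := solution.foldl (fun (acc : Int × Int) var =>
    if var > 0 then
      (xij_vars.foldl (fun s t => if t.2.2 = var then s + pvGetWij wij t.1 t.2.1 else s) acc.1,
       xijk_vars.foldl (fun s t => if t.2.2.2 = var then s + pvGetWijk wijk t.1 t.2.1 t.2.2.1 else s) acc.2)
    else acc) (0, 0)
  st.1 + st.2

-- ===== PORT B =====
def calculate_satisfied_weights_alt (solution : List Int) (xij_vars : List (Int × Int × Int)) (xijk_vars : List (Int × Int × Int × Int)) (wij : List (Int × Int × Int)) (wijk : List (Int × Int × Int × Int)) : Int :=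
  let w2 : PySem.Dict Int Int := xij_vars.foldl
    (fun d t => d.insert t.2.2 (d.getD t.2.2 0 + pvGetWij wij t.1 t.2.1)) PySem.Dict.empty
  let w3 : PySem.Dict Int Int := xijk_vars.foldl
    (fun d t => d.insert t.2.2.2 (d.getD t.2.2.2 0 + pvGetWijk wijk t.1 t.2.1 t.2.2.1)) PySem.Dict.empty
  solution.foldl (fun total var =>
    if var > 0 then total + (w2.getD var 0 + w3.getD var 0) else total) 0

-- ===== PRECONDITION & SPEC =====
def Spec_calculate_satisfied_weights (solution : List Int) (xij_vars : List (Int × Int × Int)) (xijk_vars : List (Int × Int × Int × Int)) (wij : List (Int × Int × Int)) (wijk : List (Int × Int × Int × Int)) (out : Int) : Prop := out = calculate_satisfied_weights_alt solution xij_vars xijk_vars wij wijk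
instance (solution : List Int) (xij_vars : List (Int × Int × Int)) (xijk_vars : List (Int × Int × Int × Int)) (wij : List (Int × Int × Int)) (wijk : List (Int × Int × Int × Int)) (out : Int) : Decidable (Spec_calculate_satisfied_weights solution xij_vars xijk_vars wij wijk out) := by unfold Spec_calculate_satisfied_weights; infer_instance

-- ===== CLAIM (what is proved, stated in full; the proofs are below) =====
def Claim_equal_calculate_satisfied_weights : Prop := ∀ (solution : List Int) (xij_vars : List (Int × Int × Int)) (xijk_vars : List (Int × Int × Int × Int)) (wij : List (Int × Int × Int)) (wijk : List (Int × Int × Int × Int)), Dom_calculate_satisfied_weights solution xij_vars xijk_vars wij wijk → Spec_calculate_satisfied_weights solution xij_vars xijk_vars wij wijk (calculate_satisfied_weights solution xij_vars xijk_vars wij wijk)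

-- ===== LEMMAS AND PROOFS =====

-- a conditional-accumulating foldl is the initial value plus a sum
theorem pv_foldl_if_sum {α : Type} (p : α → Prop) [DecidablePred p] (f : α → Int) :
    ∀ (L : List α) (a : Int),
      L.foldl (fun s t => if p t then s + f t else s) a
        = a + (L.map (fun t => if p t then f t else 0)).sum := by
  intro L
  induction L with
  | nil => intro a; simp
  | cons h tl ih =>
      intro a
      simp only [List.foldl_cons, List.map_cons, List.sum_cons, ih]
      by_cases hp : p h <;> simp [hp] <;> ring

-- the aggregation table's lookup is the filtered sum over the processed items
theorem pv_table_getD {α : Type} (key : α → Int) (f : α → Int) :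
    ∀ (L : List α) (d : PySem.Dict Int Int) (var : Int),
      (L.foldl (fun d t => d.insert (key t) (d.getD (key t) 0 + f t)) d).getD var 0
        = d.getD var 0 + (L.map (fun t => if key t = var then f t else 0)).sum := by
  intro L
  induction L with
  | nil => intro d var; simp
  | cons h tl ih =>
      intro d var
      simp only [List.foldl_cons, List.map_cons, List.sum_cons, ih,
        PySem.Dict.getD_insert]
      by_cases hv : var = key h
      · subst hv; simp; ring
      · have : ¬ key h = var := fun e => hv e.symm
        simp [hv, this]

-- ===== VERDICT (by name: the statement is the Claim_ definition above) =====
theorem calculate_satisfied_weights_spec : Claim_equal_calculate_satisfied_weights := by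
  intro solution xij_vars xijk_vars wij wijk _
  unfold Spec_calculate_satisfied_weights
  unfold calculate_satisfied_weights calculate_satisfied_weights_alt
  simp only
  -- rewrite B's lookups as filtered sums
  rw [pv_foldl_if_sum (fun var : Int => var > 0)]
  have hw2 : ∀ var : Int,
      (xij_vars.foldl (fun d t => d.insert t.2.2 (d.getD t.2.2 0 + pvGetWij wij t.1 t.2.1))
        PySem.Dict.empty).getD var 0
      = (xij_vars.map (fun t => if t.2.2 = var then pvGetWij wij t.1 t.2.1 else 0)).sum := by
    intro var
    rw [pv_table_getD (fun t : Int × Int × Int => t.2.2) (fun t => pvGetWij wij t.1 t.2.1)]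
    simp
  have hw3 : ∀ var : Int,
      (xijk_vars.foldl (fun d t => d.insert t.2.2.2 (d.getD t.2.2.2 0 + pvGetWijk wijk t.1 t.2.1 t.2.2.1))
        PySem.Dict.empty).getD var 0
      = (xijk_vars.map (fun t => if t.2.2.2 = var then pvGetWijk wijk t.1 t.2.1 t.2.2.1 else 0)).sum := by
    intro var
    rw [pv_table_getD (fun t : Int × Int × Int × Int => t.2.2.2)
      (fun t => pvGetWijk wijk t.1 t.2.1 t.2.2.1)]
    simp
  -- A's pair-fold: prove the invariant by induction, generalizing the accumulator
  suffices h : ∀ (sol : List Int) (a b : Int),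
      (sol.foldl (fun (acc : Int × Int) var =>
        if var > 0 then
          (xij_vars.foldl (fun s t => if t.2.2 = var then s + pvGetWij wij t.1 t.2.1 else s) acc.1,
           xijk_vars.foldl (fun s t => if t.2.2.2 = var then s + pvGetWijk wijk t.1 t.2.1 t.2.2.1 else s) acc.2)
        else acc) (a, b)).1
      + (sol.foldl (fun (acc : Int × Int) var =>
        if var > 0 then
          (xij_vars.foldl (fun s t => if t.2.2 = var then s + pvGetWij wij t.1 t.2.1 else s) acc.1,
           xijk_vars.foldl (fun s t => if t.2.2.2 = var then s + pvGetWijk wijk t.1 t.2.1 t.2.2.1 else s) acc.2)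
        else acc) (a, b)).2
      = a + b + (sol.map (fun var => if var > 0 then
          (xij_vars.map (fun t => if t.2.2 = var then pvGetWij wij t.1 t.2.1 else 0)).sum
          + (xijk_vars.map (fun t => if t.2.2.2 = var then pvGetWijk wijk t.1 t.2.1 t.2.2.1 else 0)).sum
          else 0)).sum by
    rw [h solution 0 0]
    simp only [hw2, hw3]
    ring
  intro sol
  induction sol with
  | nil => intro a b; simp
  | cons v tl ih =>
      intro a b
      by_cases hv : v > 0
      · simp only [List.foldl_cons, List.map_cons, List.sum_cons, hv, if_pos hv, if_true]
        rw [ih, pv_foldl_if_sum (fun t : Int × Int × Int => t.2.2 = v),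
          pv_foldl_if_sum (fun t : Int × Int × Int × Int => t.2.2.2 = v)]
        simp [hv]
        ring
      · simp only [List.foldl_cons, List.map_cons, List.sum_cons, if_neg hv]
        rw [ih]
        simp [hv]
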